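-- pv_equiv track=rewrite | github.com/Will-Barnard-WB/AI-Revision-Agent | tools.py | _cap_recent_activity
-- ===== SOURCE A (Python) =====
-- _MEMORY_CAP = 50  # max entries in Recent Activity
--
-- def _cap_recent_activity(memory_text: str) -> str:
--     """Ensure Recent Activity has at most _MEMORY_CAP entries."""
--     lines = memory_text.split("\n")
--     result = []
--     in_recent = False
--     activity_lines: list[str] = []
--     other_lines_after: list[str] = []
--
--     for line in lines:
--         if line.strip().startswith("## Recent Activity"):
--             in_recent = True
--             result.append(line)
--             continue
--         if in_recent and line.strip().startswith("## "):
--             # Hit next section — cap activity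
--             in_recent = False
--             other_lines_after.append(line)
--             continue
--         if in_recent:
--             if line.strip().startswith("- ["):
--                 activity_lines.append(line)
--             else:
--                 result.append(line)  # comments / blanks
--             continue
--         if other_lines_after:
--             other_lines_after.append(line)
--         else:
--             result.append(line)
--
--     # Keep only the most recent entries
--     if len(activity_lines) > _MEMORY_CAP:
--         activity_lines = activity_lines[-_MEMORY_CAP:]
--
--     result.extend(activity_lines)
--     if not result[-1].strip():
--         pass  # already has trailing blank
--     else:
--         result.append("")
--     result.extend(other_lines_after)
--     return "\n".join(result)
-- ===== SOURCE B (Python) =====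
-- _MEMORY_CAP = 50  # max entries in Recent Activity
--
--
-- def _is_header(line):
--     return line.strip().startswith("## Recent Activity")
--
--
-- def _is_section(line):
--     return line.strip().startswith("## ")
--
--
-- def _is_entry(line):
--     return line.strip().startswith("- [")
--
--
-- def _find_index(lines, pred):
--     for i, l in enumerate(lines):
--         if pred(l):
--             return i
--     return None
--
--
-- def _cap_recent_activity(memory_text: str) -> str:
--     lines = memory_text.split("\n")
--     h = _find_index(lines, _is_header)
--     if h is None:
--         out, tail = list(lines), []
--     else:
--         rest = lines[h + 1:]
--         n = _find_index(rest, _is_section)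
--         body, tail = (rest, []) if n is None else (rest[:n], rest[n:])
--         entries = [l for l in body if _is_entry(l)]
--         others = [l for l in body if not _is_entry(l)]
--         out = lines[:h + 1] + others + entries[-_MEMORY_CAP:]
--     if out[-1].strip():
--         out.append("")
--     return "\n".join(out + tail)
-- ===== Notes on version B (the rewrite author's own statement) =====
-- stated objective: alternative
-- what changed: Replaces A's single stateful four-accumulator scan (in_recent flag, activity/other buffers) by an index-based decomposition: locate the header line, locate the next section line, slice the text into prefix/body/tail, partition the body once, and reassemble with the entry list capped to its last 50.
import Mathlib
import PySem

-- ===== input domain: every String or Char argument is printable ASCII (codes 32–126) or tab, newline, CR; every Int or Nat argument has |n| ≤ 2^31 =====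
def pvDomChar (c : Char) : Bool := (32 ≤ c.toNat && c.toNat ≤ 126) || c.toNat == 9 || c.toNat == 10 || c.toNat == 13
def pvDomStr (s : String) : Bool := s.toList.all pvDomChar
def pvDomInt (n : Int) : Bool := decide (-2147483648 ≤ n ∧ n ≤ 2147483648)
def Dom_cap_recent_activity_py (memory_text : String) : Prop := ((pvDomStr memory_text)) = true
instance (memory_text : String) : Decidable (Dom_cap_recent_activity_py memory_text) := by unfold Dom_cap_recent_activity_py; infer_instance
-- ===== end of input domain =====

-- B replaces A's single stateful four-accumulator scan by an index-based slice/partition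
-- decomposition (objective: alternative, same asymptotic cost).

-- ===== PORT A =====
-- the for-loop of A, state = (result, in_recent, activity_lines, other_lines_after)
def capLoopA : List String → (List String × Bool × List String × List String) →
    (List String × Bool × List String × List String)
  | [], st => st
  | line :: rest, (result, in_recent, activity, other) =>
    if PySem.Str.startswith (PySem.Str.strip line) "## Recent Activity" then
      capLoopA rest (result ++ [line], true, activity, other)
    else if in_recent && PySem.Str.startswith (PySem.Str.strip line) "## " then
      capLoopA rest (result, false, activity, other ++ [line])
    else if in_recent then
      (if PySem.Str.startswith (PySem.Str.strip line) "- [" then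
        capLoopA rest (result, in_recent, activity ++ [line], other)
      else
        capLoopA rest (result ++ [line], in_recent, activity, other))
    else if !other.isEmpty then
      capLoopA rest (result, in_recent, activity, other ++ [line])
    else
      capLoopA rest (result ++ [line], in_recent, activity, other)

def cap_recent_activity_py (memory_text : String) : String :=
  let lines := (PySem.Str.split? memory_text "\n").getD []
  match capLoopA lines ([], false, [], []) with
  | (result, _, activity, other) =>
    let activity := if activity.length > 50 then PySem.List.slice activity (some (-50)) none else activity
    let result := result ++ activity
    -- result[-1]: result is provably nonempty here (split always returns ≥ 1 piece and the
    -- loop puts the first line into result), so pyGetD with default "" is exact (no IndexError)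
    let result := if (PySem.Str.strip (PySem.List.pyGetD result (-1) "")) = "" then result
                  else result ++ [""]
    PySem.Str.join "\n" (result ++ other)

-- ===== PORT B =====
def pvIsHeader (l : String) : Bool := PySem.Str.startswith (PySem.Str.strip l) "## Recent Activity"
def pvIsSection (l : String) : Bool := PySem.Str.startswith (PySem.Str.strip l) "## "
def pvIsEntry (l : String) : Bool := PySem.Str.startswith (PySem.Str.strip l) "- ["

def cap_recent_activity_py_alt (memory_text : String) : String :=
  let lines := (PySem.Str.split? memory_text "\n").getD []
  let (out, tail) :=
    match List.findIdx? pvIsHeader lines with   -- _find_index(lines, _is_header)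
    | none => (lines, ([] : List String))
    | some h =>
      let rest := PySem.List.slice lines (some ((h : Int) + 1)) none
      let (body, tail) :=
        match List.findIdx? pvIsSection rest with   -- _find_index(rest, _is_section)
        | none => (rest, ([] : List String))
        | some n => (PySem.List.slice rest none (some (n : Int)),
                     PySem.List.slice rest (some (n : Int)) none)
      let entries := body.filter pvIsEntry
      let others := body.filter (fun l => !pvIsEntry l)
      (PySem.List.slice lines none (some ((h : Int) + 1)) ++ others ++
         PySem.List.slice entries (some (-50)) none, tail)
  -- out[-1]: out is provably nonempty here, pyGetD with default "" is exact
  let out := if (PySem.Str.strip (PySem.List.pyGetD out (-1) "")) = "" then out else out ++ [""]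
  PySem.Str.join "\n" (out ++ tail)

-- ===== PRECONDITION & SPEC =====
-- Pre_ excludes texts containing two or more '## Recent Activity' header lines: there A
-- re-enters the section at the duplicate header and interleaves both sections' entries and
-- tails in an accidental order, while B keeps only the first section special — a defensible
-- corner (duplicate section headers) on which neither ordering is specified.
def Pre_cap_recent_activity_py (memory_text : String) : Prop :=
  (((PySem.Str.split? memory_text "\n").getD []).filter
      (fun l => PySem.Str.startswith (PySem.Str.strip l) "## Recent Activity")).length ≤ 1
instance (memory_text : String) : Decidable (Pre_cap_recent_activity_py memory_text) := by
  unfold Pre_cap_recent_activity_py; infer_instance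

def pvWitness_cap_recent_activity_py : String :=
  "# Memory\n## Recent Activity\n- [x] did a thing\nnote\n\n## Next Steps\n- later"

def Spec_cap_recent_activity_py (memory_text : String) (out : String) : Prop :=
  out = cap_recent_activity_py_alt memory_text
instance (memory_text : String) (out : String) :
    Decidable (Spec_cap_recent_activity_py memory_text out) := by
  unfold Spec_cap_recent_activity_py; infer_instance

-- ===== CLAIM (what is proved, stated in full; the proofs are below) =====
def Claim_equal_cap_recent_activity_py : Prop :=
  ∀ (memory_text : String), Dom_cap_recent_activity_py memory_text →
    Pre_cap_recent_activity_py memory_text →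
    Spec_cap_recent_activity_py memory_text (cap_recent_activity_py memory_text)

-- ===== LEMMAS AND PROOFS =====

theorem capLoopA_append (xs ys : List String) (st : List String × Bool × List String × List String) :
    capLoopA (xs ++ ys) st = capLoopA ys (capLoopA xs st) := by
  induction xs generalizing st with
  | nil => rfl
  | cons l xs ih =>
    obtain ⟨res, inr, act, oth⟩ := st
    simp only [List.cons_append, capLoopA]
    split_ifs <;> apply ih

-- before the header: everything goes to result
theorem capLoopA_no_header (ls : List String) (res act : List String)
    (h : ∀ l ∈ ls, pvIsHeader l = false) :
    capLoopA ls (res, false, act, []) = (res ++ ls, false, act, []) := by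
  induction ls generalizing res with
  | nil => simp [capLoopA]
  | cons l ls ih =>
    have hl : PySem.Str.startswith (PySem.Str.strip l) "## Recent Activity" = false := by
      simpa [pvIsHeader] using h l (List.mem_cons_self)
    simp only [capLoopA, hl]
    rw [if_neg (by simp), if_neg (by simp), if_neg (by simp), if_neg (by simp)]
    rw [ih (res ++ [l]) (fun x hx => h x (List.mem_cons_of_mem _ hx))]
    simp

-- after the next section: everything goes to other_lines_after
theorem capLoopA_tail (ls : List String) (res act oth : List String) (hne : oth.isEmpty = false)
    (h : ∀ l ∈ ls, pvIsHeader l = false) :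
    capLoopA ls (res, false, act, oth) = (res, false, act, oth ++ ls) := by
  induction ls generalizing oth with
  | nil => simp [capLoopA]
  | cons l ls ih =>
    have hl : PySem.Str.startswith (PySem.Str.strip l) "## Recent Activity" = false := by
      simpa [pvIsHeader] using h l (List.mem_cons_self)
    simp only [capLoopA, hl]
    rw [if_neg (by simp), if_neg (by simp), if_neg (by simp), if_pos (by simp [hne])]
    rw [ih (oth ++ [l]) (by simp) (fun x hx => h x (List.mem_cons_of_mem _ hx))]
    simp

-- inside the section: partition until the next '## ' line (if any), then the tail
theorem capLoopA_recent (ls : List String) (res act : List String)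
    (h : ∀ l ∈ ls, pvIsHeader l = false) :
    capLoopA ls (res, true, act, []) =
      match List.findIdx? pvIsSection ls with
      | none => (res ++ ls.filter (fun l => !pvIsEntry l), true, act ++ ls.filter pvIsEntry, [])
      | some n => (res ++ (ls.take n).filter (fun l => !pvIsEntry l), false,
                   act ++ (ls.take n).filter pvIsEntry, ls.drop n) := by
  induction ls generalizing res act with
  | nil => simp [capLoopA]
  | cons l ls ih =>
    have hl : PySem.Str.startswith (PySem.Str.strip l) "## Recent Activity" = false := by
      simpa [pvIsHeader] using h l (List.mem_cons_self)
    have hrest : ∀ x ∈ ls, pvIsHeader x = false := fun x hx => h x (List.mem_cons_of_mem _ hx)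
    rw [List.findIdx?_cons]
    by_cases hs : pvIsSection l
    · -- next section hit at the head
      have hs' : PySem.Str.startswith (PySem.Str.strip l) "## " = true := by
        simpa [pvIsSection] using hs
      simp only [hs, if_true]
      simp only [capLoopA, hl]
      rw [if_neg (by simp), if_pos (by simp only [hs', Bool.true_and])]
      simp only [List.nil_append]
      rw [capLoopA_tail ls res act [l] rfl hrest]
      simp
    · have hs' : PySem.Str.startswith (PySem.Str.strip l) "## " = false := by
        simpa [pvIsSection] using hs
      simp only [hs]
      by_cases he : pvIsEntry l
      · -- an activity entry
        have he' : PySem.Str.startswith (PySem.Str.strip l) "- [" = true := by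
          simpa [pvIsEntry] using he
        have step : capLoopA (l :: ls) (res, true, act, []) =
            capLoopA ls (res, true, act ++ [l], []) := by
          simp only [capLoopA, hl]
          rw [if_neg (by simp), if_neg (by rw [Bool.true_and, hs']; decide)]
          simp only [if_true]
          rw [if_pos he']
        rw [step, ih res (act ++ [l]) hrest]
        cases hf : List.findIdx? pvIsSection ls <;>
          simp [he, List.append_assoc]
      · -- a comment / blank
        have he' : PySem.Str.startswith (PySem.Str.strip l) "- [" = false := by
          simpa [pvIsEntry] using he
        have step : capLoopA (l :: ls) (res, true, act, []) =
            capLoopA ls (res ++ [l], true, act, []) := by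
          simp only [capLoopA, hl]
          rw [if_neg (by simp), if_neg (by rw [Bool.true_and, hs']; decide)]
          simp only [if_true]
          rw [if_neg (by rw [he']; decide)]
        rw [step, ih (res ++ [l]) act hrest]
        cases hf : List.findIdx? pvIsSection ls <;>
          simp [he, List.append_assoc]

-- entries[-50:] equals A's conditional cap
theorem cap_eq_slice (xs : List String) :
    (if xs.length > 50 then PySem.List.slice xs (some (-50)) none else xs) =
      PySem.List.slice xs (some (-50)) none := by
  rw [PySem.List.slice_from_neg_ofNat xs 50 (by omega)]
  split_ifs with hlen
  · rfl
  · have : xs.length - 50 = 0 := by omega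
    rw [this, List.drop_zero]

-- ===== VERDICT (by name: the statement is the Claim_ definition above) =====
theorem cap_recent_activity_py_spec : Claim_equal_cap_recent_activity_py := by
  intro s _hdom hpre
  unfold Pre_cap_recent_activity_py at hpre
  unfold Spec_cap_recent_activity_py
  simp only [cap_recent_activity_py, cap_recent_activity_py_alt]
  set lines := (PySem.Str.split? s "\n").getD [] with hlines
  have hpre' : (lines.filter pvIsHeader).length ≤ 1 := hpre
  clear hpre
  cases hfi : List.findIdx? pvIsHeader lines with
  | none =>
    have hnone : ∀ l ∈ lines, pvIsHeader l = false := by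
      intro x hx
      exact (List.findIdx?_eq_none_iff.mp hfi) x hx
    rw [capLoopA_no_header lines [] [] hnone]
    simp
  | some h =>
    obtain ⟨hlt, hhd, hbefore⟩ := List.findIdx?_eq_some_iff_getElem.mp hfi
    -- decompose lines
    have hdec : lines = lines.take h ++ lines[h] :: lines.drop (h + 1) := by
      conv_lhs => rw [← List.take_append_drop h lines]
      rw [List.drop_eq_getElem_cons hlt]
    have hpreh : ∀ l ∈ lines.take h, pvIsHeader l = false := by
      intro x hx
      obtain ⟨j, hj, rfl⟩ := List.getElem_of_mem hx
      have hj' : j < h := lt_of_lt_of_le hj (by simp [List.length_take])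
      rw [List.getElem_take]
      exact Bool.not_eq_true _ ▸ (by simpa using hbefore j hj')
    have hposth : ∀ l ∈ lines.drop (h + 1), pvIsHeader l = false := by
      -- from the cap on the number of header lines
      intro x hx
      by_contra hxh
      have hxh' : pvIsHeader x = true := by simpa using hxh
      have : 2 ≤ (lines.filter pvIsHeader).length := by
        rw [hdec]
        rw [List.filter_append, List.filter_cons]
        simp only [hhd, if_pos]
        have : x ∈ (lines.drop (h + 1)).filter pvIsHeader := List.mem_filter.mpr ⟨hx, hxh'⟩
        have h1 : 1 ≤ ((lines.drop (h + 1)).filter pvIsHeader).length :=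
          List.length_pos_of_mem this
        simp only [List.length_append, List.length_cons]
        omega
      omega
    -- run A's loop over the decomposition
    have hrun : capLoopA lines ([], false, [], []) =
        capLoopA (lines.drop (h + 1)) (lines.take h ++ [lines[h]], true, [], []) := by
      conv_lhs => rw [hdec]
      rw [capLoopA_append, capLoopA_no_header _ _ _ hpreh]
      have : capLoopA (lines[h] :: lines.drop (h + 1)) ([] ++ lines.take h, false, [], []) =
          capLoopA (lines.drop (h + 1)) (lines.take h ++ [lines[h]], true, [], []) := by
        simp only [capLoopA, List.nil_append]
        rw [if_pos (by simpa [pvIsHeader] using hhd)]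
      rw [this]
    rw [hrun, capLoopA_recent _ _ _ hposth]
    -- B's slices
    have hrest : PySem.List.slice lines (some ((h : Int) + 1)) none = lines.drop (h + 1) := by
      have : ((h : Int) + 1) = ((h + 1 : Nat) : Int) := by push_cast; ring
      rw [this, PySem.List.slice_from_natCast]
    have htake1 : PySem.List.slice lines none (some ((h : Int) + 1)) = lines.take (h + 1) := by
      have : ((h : Int) + 1) = ((h + 1 : Nat) : Int) := by push_cast; ring
      rw [this, PySem.List.slice_to_natCast]
    have htk : lines.take (h + 1) = lines.take h ++ [lines[h]] :=
      List.take_succ_eq_append_getElem hlt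
    cases hfs : List.findIdx? pvIsSection (lines.drop (h + 1)) with
    | none =>
      simp only [hrest, hfs, htake1, htk, cap_eq_slice]
      simp [List.append_assoc]
    | some n =>
      have hn : ((n : Int)) = ((n : Nat) : Int) := rfl
      simp only [hrest, hfs, htake1, htk, cap_eq_slice,
        PySem.List.slice_to_natCast, PySem.List.slice_from_natCast]
      simp [List.append_assoc]
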